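-- pv_equiv track=rewrite | github.com/AnasAlaa11/Wordle-Solver-Entropy | main.py | pattern_to_code
-- ===== SOURCE A (Python) =====
-- def pattern_to_code(pattern_str: str) -> int:
--     """
--     A function to convert the pattern from letters to decimal.
--
--     Args:
--         pattern_str (str): feedback in characters form.
--
--     Returns:
--         feedback in decimal form.
--     """
--
--     total = 0
--
--     for i in range(5):
--         power = 4 - i
--
--         if pattern_str[i] == "g":
--             total += (3**power) * 2
--
--         elif pattern_str[i] == "y":
--             total += 3**power
--
--     return total
-- ===== SOURCE B (Python) =====
-- def pattern_to_code(pattern_str: str) -> int: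
--     code = {'g': '2', 'y': '1'}
--     digits = ''.join(code.get(pattern_str[i], '0') for i in range(5))
--     return int(digits, 3)
-- ===== Notes on version B (the rewrite author's own statement) =====
-- stated objective: idiomatic
-- what changed: Instead of accumulating 3**(4-i) place values arithmetically, B translates the pattern into a 5-character base-3 digit string and delegates the conversion to int(digits, 3).
import Mathlib
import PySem

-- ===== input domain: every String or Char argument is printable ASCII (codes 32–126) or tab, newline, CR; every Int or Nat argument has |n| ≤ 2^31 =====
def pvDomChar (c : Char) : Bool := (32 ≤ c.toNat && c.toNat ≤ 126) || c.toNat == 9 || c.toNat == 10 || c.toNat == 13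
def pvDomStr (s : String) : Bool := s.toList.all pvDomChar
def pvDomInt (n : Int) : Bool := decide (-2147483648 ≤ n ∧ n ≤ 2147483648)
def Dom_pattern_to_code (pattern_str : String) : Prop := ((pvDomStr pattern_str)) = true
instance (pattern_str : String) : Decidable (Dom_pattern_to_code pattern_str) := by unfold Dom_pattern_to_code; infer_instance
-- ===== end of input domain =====

-- B translates the pattern into a 5-char base-3 digit string and converts it with int(_, 3) (ported as Nat.ofDigits), instead of summing 3**(4-i) place values.


-- ===== PORT A =====
-- for i in range(5): power = 4-i; add 3**power*2 if 'g', 3**power if 'y'.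
-- pyGet? = none is Python's IndexError (excluded by Pre_); the exponent 4-i is ≥ 0 for i ∈ range(5), so .toNat is exact.
def pattern_to_code (pattern_str : String) : Int :=
  (PySem.List.pyRange 0 5 1).foldl (fun total i =>
    let power : Nat := (4 - i).toNat
    match PySem.Str.pyGet? pattern_str i with
    | some c =>
        if c = 'g' then total + (3 : Int) ^ power * 2
        else if c = 'y' then total + (3 : Int) ^ power
        else total
    | none => total) 0

-- ===== PORT B =====
-- digits = ''.join({'g':'2','y':'1'}.get(pattern_str[i],'0') for i in range(5)); int(digits, 3).
-- int(digits, 3) is the library base-3 parse; ported as Mathlib's Nat.ofDigits 3 on the reversed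
-- (little-endian) digit values — exact here since every digit char is '0'..'2'.
def pattern_to_code_alt (pattern_str : String) : Int :=
  let digits : List Char := (PySem.List.pyRange 0 5 1).map (fun i =>
    match PySem.Str.pyGet? pattern_str i with
    | some c => if c = 'g' then '2' else if c = 'y' then '1' else '0'
    | none => '0')
  ((Nat.ofDigits 3 ((digits.map (fun ch => ch.toNat - '0'.toNat)).reverse) : Nat) : Int)

-- ===== PRECONDITION & SPEC =====
-- Pre_ excludes exactly the strings of length < 5, on which A raises IndexError.
def Pre_pattern_to_code (pattern_str : String) : Prop := 5 ≤ pattern_str.toList.length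
instance (pattern_str : String) : Decidable (Pre_pattern_to_code pattern_str) := by unfold Pre_pattern_to_code; infer_instance
def pvWitness_pattern_to_code : String := "gyxgy"

def Spec_pattern_to_code (pattern_str : String) (out : Int) : Prop := out = pattern_to_code_alt pattern_str
instance (pattern_str : String) (out : Int) : Decidable (Spec_pattern_to_code pattern_str out) := by unfold Spec_pattern_to_code; infer_instance

-- ===== CLAIM (what is proved, stated in full; the proofs are below) =====
def Claim_equal_pattern_to_code : Prop := ∀ (pattern_str : String), Dom_pattern_to_code pattern_str → Pre_pattern_to_code pattern_str → Spec_pattern_to_code pattern_str (pattern_to_code pattern_str)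

-- ===== LEMMAS AND PROOFS =====
-- the base-3 digit a feedback character contributes (2 for 'g', 1 for 'y', 0 otherwise)
def pvDigit (c : Char) : Int := if c = 'g' then 2 else if c = 'y' then 1 else 0

theorem pvDigit_stepA (c : Char) (total : Int) (p : Nat) :
    (if c = 'g' then total + (3 : Int) ^ p * 2
     else if c = 'y' then total + (3 : Int) ^ p else total) = total + 3 ^ p * pvDigit c := by
  unfold pvDigit; split_ifs <;> ring

theorem pvDigit_char (c : Char) :
    (((if c = 'g' then '2' else if c = 'y' then '1' else '0').toNat - 48 : Nat) : Int)
      = pvDigit c := by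
  unfold pvDigit; split_ifs <;> rfl

set_option maxHeartbeats 1000000 in
theorem pattern_to_code_ofList (a b c d e : Char) (t : List Char) :
    pattern_to_code (String.ofList (a :: b :: c :: d :: e :: t)) =
    pattern_to_code_alt (String.ofList (a :: b :: c :: d :: e :: t)) := by
  have hr : PySem.List.pyRange 0 5 1 = [0, 1, 2, 3, 4] := by decide
  have hstr : ∀ i : Int, PySem.Str.pyGet? (String.ofList (a :: b :: c :: d :: e :: t)) i =
      PySem.List.pyGet? (a :: b :: c :: d :: e :: t) i := fun i => by
    simp [PySem.Str.pyGet?, PySem.List.pyGet?]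
  have h0 : PySem.List.pyGet? (a :: b :: c :: d :: e :: t) (0 : Int) = some a := by
    simp only [PySem.List.pyGet?, PySem.List.pyIdx?]
    norm_num
    rw [if_pos (by omega)]
    rfl
  have h1 : PySem.List.pyGet? (a :: b :: c :: d :: e :: t) (1 : Int) = some b := by
    simp only [PySem.List.pyGet?, PySem.List.pyIdx?]
    norm_num
    rw [if_pos (by omega)]
    rfl
  have h2 : PySem.List.pyGet? (a :: b :: c :: d :: e :: t) (2 : Int) = some c := by
    simp only [PySem.List.pyGet?, PySem.List.pyIdx?]
    norm_num
    rw [if_pos (by omega)]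
    rfl
  have h3 : PySem.List.pyGet? (a :: b :: c :: d :: e :: t) (3 : Int) = some d := by
    simp only [PySem.List.pyGet?, PySem.List.pyIdx?]
    norm_num
    rw [if_pos (by omega)]
    rfl
  have h4 : PySem.List.pyGet? (a :: b :: c :: d :: e :: t) (4 : Int) = some e := by
    simp only [PySem.List.pyGet?, PySem.List.pyIdx?]
    norm_num
    rw [if_pos (by omega)]
    rfl
  simp only [pattern_to_code, pattern_to_code_alt, hr, List.foldl, List.map, List.reverse,
    hstr, h0, h1, h2, h3, h4, pvDigit_stepA, List.reverseAux, Nat.ofDigits_cons, Nat.ofDigits_nil]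
  push_cast [pvDigit_char]
  norm_num [show ((4:Int) - 0).toNat = 4 from rfl, show ((4:Int) - 1).toNat = 3 from rfl,
    show ((4:Int) - 2).toNat = 2 from rfl, show ((4:Int) - 3).toNat = 1 from rfl,
    show ((4:Int) - 4).toNat = 0 from rfl]
  unfold pvDigit
  split_ifs <;> norm_num

-- ===== VERDICT (by name: the statement is the Claim_ definition above) =====
theorem pattern_to_code_spec : Claim_equal_pattern_to_code := by
  intro s _ hpre
  unfold Spec_pattern_to_code
  obtain ⟨a, b, c, d, e, t, hs⟩ : ∃ a b c d e t, s.toList = a :: b :: c :: d :: e :: t := by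
    unfold Pre_pattern_to_code at hpre
    match h : s.toList with
    | x1 :: x2 :: x3 :: x4 :: x5 :: t => exact ⟨x1, x2, x3, x4, x5, t, rfl⟩
    | [] | [_] | [_,_] | [_,_,_] | [_,_,_,_] => (rw [h] at hpre; simp at hpre)
  have hrw : s = String.ofList (a :: b :: c :: d :: e :: t) := by
    rw [← hs, String.ofList_toList]
  rw [hrw, pattern_to_code_ofList]
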